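-- pv_equiv track=rewrite | github.com/Phuong-code/Advent-of-Code-2023 | Day17/part1_old.py | iterate_diagonally
-- ===== SOURCE A (Python) =====
-- def iterate_diagonally(grid):
--     rows = len(grid)
--     cols = len(grid[0]) if rows > 0 else 0
--     for s in range(rows + cols - 1):
--         for row in range(s + 1):
--             col = s - row
--             if row < rows and col < cols:
--                 yield (row, col)
-- ===== SOURCE B (Python) =====
-- def iterate_diagonally(grid):
--     rows = len(grid)
--     cols = len(grid[0]) if rows > 0 else 0
--     buckets = {}
--     for r in range(rows):
--         for c in range(cols):
--             buckets.setdefault(r + c, []).append((r, c))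
--     for s in range(rows + cols - 1):
--         yield from buckets.get(s, [])
-- ===== Notes on version B (the rewrite author's own statement) =====
-- stated objective: alternative
-- what changed: B makes one row-major pass over the cells, grouping them into per-diagonal buckets in a dict keyed by r+c, then emits the buckets in diagonal order, instead of A's scan of every candidate row of every diagonal with an in-bounds filter.
import Mathlib
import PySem

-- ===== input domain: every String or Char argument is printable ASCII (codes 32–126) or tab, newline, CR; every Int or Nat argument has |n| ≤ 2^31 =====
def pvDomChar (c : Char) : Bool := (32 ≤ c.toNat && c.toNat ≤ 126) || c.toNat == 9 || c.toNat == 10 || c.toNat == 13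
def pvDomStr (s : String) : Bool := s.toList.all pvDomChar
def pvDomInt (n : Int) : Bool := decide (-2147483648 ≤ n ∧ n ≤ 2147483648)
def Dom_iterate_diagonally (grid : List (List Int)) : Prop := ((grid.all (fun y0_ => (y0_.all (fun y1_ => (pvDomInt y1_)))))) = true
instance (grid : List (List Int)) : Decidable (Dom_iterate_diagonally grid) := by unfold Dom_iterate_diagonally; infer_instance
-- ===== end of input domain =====

-- B groups cells into per-diagonal buckets (dict keyed by r+c) in one row-major pass and emits the buckets, instead of A's scan-and-filter over each anti-diagonal (alternative algorithm; not measured faster).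


-- ===== PORT A =====
def iterate_diagonally (grid : List (List Int)) : List (Int × Int) :=
  let rows : Int := grid.length
  let cols : Int := if rows > 0 then ((PySem.List.pyGetD grid 0 []).length : Int) else 0
  (PySem.List.pyRange 0 (rows + cols - 1) 1).foldl (fun acc s =>
    (PySem.List.pyRange 0 (s + 1) 1).foldl (fun acc row =>
      let col := s - row
      if row < rows ∧ col < cols then acc ++ [(row, col)] else acc) acc) []

-- ===== PORT B =====
def iterate_diagonally_alt (grid : List (List Int)) : List (Int × Int) :=
  let rows : Int := grid.length
  let cols : Int := if rows > 0 then ((PySem.List.pyGetD grid 0 []).length : Int) else 0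
  -- buckets.setdefault(r + c, []).append((r, c))  =  modify (r+c) [] (· ++ [(r, c)])
  let buckets : PySem.Dict Int (List (Int × Int)) :=
    (PySem.List.pyRange 0 rows 1).foldl (fun d r =>
      (PySem.List.pyRange 0 cols 1).foldl (fun d c =>
        d.modify (r + c) [] (· ++ [(r, c)])) d) PySem.Dict.empty
  (PySem.List.pyRange 0 (rows + cols - 1) 1).foldl (fun acc s => acc ++ buckets.getD s []) []

-- ===== PRECONDITION & SPEC =====
def Spec_iterate_diagonally (grid : List (List Int)) (out : List (Int × Int)) : Prop := out = iterate_diagonally_alt grid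
instance (grid : List (List Int)) (out : List (Int × Int)) : Decidable (Spec_iterate_diagonally grid out) := by unfold Spec_iterate_diagonally; infer_instance

-- ===== CLAIM (what is proved, stated in full; the proofs are below) =====
def Claim_equal_iterate_diagonally : Prop := ∀ (grid : List (List Int)), Dom_iterate_diagonally grid → Spec_iterate_diagonally grid (iterate_diagonally grid)

-- ===== LEMMAS AND PROOFS =====

-- filtering an integer range by a window [lo, hi) is the clipped range
theorem filter_pyRange_window (lo hi : Int) : ∀ (a b : Int),
    (PySem.List.pyRange a b 1).filter (fun x => decide (lo ≤ x) && decide (x < hi))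
      = PySem.List.pyRange (max a lo) (min b hi) 1 := by
  intro a b
  by_cases hab : b ≤ a
  · rw [PySem.List.pyRange_one_eq_nil hab, PySem.List.pyRange_one_eq_nil (by omega)]
    rfl
  · push Not at hab
    have hlen : (b - (a + 1)).toNat < (b - a).toNat := by omega
    rw [PySem.List.pyRange_one_cons hab, List.filter_cons]
    have ih := filter_pyRange_window lo hi (a + 1) b
    by_cases hin : lo ≤ a ∧ a < hi
    · have h1 : (decide (lo ≤ a) && decide (a < hi)) = true := by
        simp [hin.1, hin.2]
      rw [h1]
      simp only [ih]
      have hmax : max (a + 1) lo = a + 1 := by omega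
      have hmax' : max a lo = a := by omega
      have hlt : a < min b hi := by omega
      rw [hmax, hmax', PySem.List.pyRange_one_cons hlt]
      simp
    · have h1 : (decide (lo ≤ a) && decide (a < hi)) = false := by
        rcases not_and_or.mp hin with h | h <;> simp [h]
      rw [h1]
      simp only [ih]
      rcases not_and_or.mp hin with h | h
      · have : max (a + 1) lo = max a lo := by omega
        rw [this]
        simp
      · rw [PySem.List.pyRange_one_eq_nil (by omega),
            PySem.List.pyRange_one_eq_nil (by omega)]
        simp
termination_by a b => (b - a).toNat
decreasing_by omega

-- A's inner scan-and-filter over diagonal s equals the clipped row range, mapped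
theorem inner_diag_eq (rows cols s : Int) (acc : List (Int × Int)) :
    (PySem.List.pyRange 0 (s + 1) 1).foldl (fun acc row =>
      let col := s - row
      if row < rows ∧ col < cols then acc ++ [(row, col)] else acc) acc
    = acc ++ (PySem.List.pyRange (max 0 (s - cols + 1)) (min (s + 1) rows) 1).map
        (fun row => (row, s - row)) := by
  rw [PySem.List.foldl_append_ite (fun row => row < rows ∧ s - row < cols)
        (fun row => (row, s - row))]
  congr 1
  have hp : (fun x => decide (x < rows ∧ s - x < cols))
      = (fun x => decide ((s - cols + 1) ≤ x) && decide (x < rows)) := by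
    funext x
    rw [Bool.decide_and, Bool.and_comm]
    congr 1
    exact decide_eq_decide.mpr (by omega)
  rw [hp, filter_pyRange_window (s - cols + 1) rows 0 (s + 1)]

-- the nested bucket-filling loop is a fold over the row-major cell list
theorem buckets_nested_eq (xs ys : List Int) (d : PySem.Dict Int (List (Int × Int))) :
    xs.foldl (fun d r => ys.foldl (fun d c => d.modify (r + c) [] (· ++ [(r, c)])) d) d
    = (xs.flatMap (fun r => ys.map (fun c => ((r + c), ((r, c) : Int × Int))))).foldl
        (fun d p => d.modify p.1 [] (· ++ [p.2])) d := by
  induction xs generalizing d with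
  | nil => simp
  | cons r xs ih => simp [List.foldl_append, List.foldl_map, ih]

-- collapsing a singleton-or-empty flatMap into filter-then-map
theorem flatMap_if_singleton {α β : Type} (p : α → Bool) (f : α → β) (l : List α) :
    l.flatMap (fun x => if p x then [f x] else []) = (l.filter p).map f := by
  induction l with
  | nil => rfl
  | cons x l ih =>
    by_cases h : p x <;> simp [List.flatMap_cons, h, ih]

-- bucket s of the filled dict is exactly the clipped row range of diagonal s, mapped
theorem bucket_eq (rows cols s : Int) :
    (((PySem.List.pyRange 0 rows 1).foldl (fun d r =>
        (PySem.List.pyRange 0 cols 1).foldl (fun d c =>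
          d.modify (r + c) [] (· ++ [(r, c)])) d) PySem.Dict.empty).getD s [])
    = (PySem.List.pyRange (max 0 (s - cols + 1)) (min (s + 1) rows) 1).map
        (fun row => (row, s - row)) := by
  rw [buckets_nested_eq, PySem.Dict.getD_foldl_modify_append]
  rw [PySem.Dict.getD_empty]
  rw [List.filter_flatMap]
  simp only [List.filter_map, Function.comp_def, List.nil_append, List.map_flatMap,
    List.map_map]
  have hinner : ∀ r : Int,
      ((PySem.List.pyRange 0 cols 1).filter (fun c => (r + c == s))).map
          (fun c => ((r, c) : Int × Int))
      = if (decide (s - cols + 1 ≤ r) && decide (r < s + 1)) then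
          [((r, s - r) : Int × Int)] else [] := by
    intro r
    have hp : (fun c : Int => (r + c == s))
        = (fun c => decide (s - r ≤ c) && decide (c < s - r + 1)) := by
      funext c
      by_cases h : r + c = s
      · simp only [h, beq_self_eq_true]
        have h1 : s - r ≤ c := by omega
        have h2 : c < s - r + 1 := by omega
        simp [h1, h2]
      · have : (r + c == s) = false := by simpa using h
        rw [this]
        rcases Int.lt_or_le c (s - r) with hc | hc
        · simp [show ¬ (s - r ≤ c) by omega]
        · simp [show ¬ (c < s - r + 1) by omega]
    rw [hp, filter_pyRange_window (s - r) (s - r + 1) 0 cols]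
    by_cases hin : 0 ≤ s - r ∧ s - r < cols
    · have h1 : max 0 (s - r) = s - r := by omega
      have h2 : min cols (s - r + 1) = s - r + 1 := by omega
      rw [h1, h2, PySem.List.pyRange_one_cons (by omega),
          PySem.List.pyRange_one_eq_nil (by omega)]
      have hb : (decide (s - cols + 1 ≤ r) && decide (r < s + 1)) = true := by
        simp only [Bool.and_eq_true, decide_eq_true_eq]; omega
      rw [hb]
      simp
    · rw [PySem.List.pyRange_one_eq_nil (by omega)]
      have hb : (decide (s - cols + 1 ≤ r) && decide (r < s + 1)) = false := by
        rcases not_and_or.mp hin with h | h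
        · simp only [Bool.and_eq_false_iff, decide_eq_false_iff_not]; right; omega
        · simp only [Bool.and_eq_false_iff, decide_eq_false_iff_not]; left; omega
      rw [hb]
      simp
  simp only [hinner]
  rw [flatMap_if_singleton, filter_pyRange_window (s - cols + 1) (s + 1) 0 rows]
  have : min rows (s + 1) = min (s + 1) rows := by omega
  rw [this]

-- ===== VERDICT (by name: the statement is the Claim_ definition above) =====
theorem iterate_diagonally_spec : Claim_equal_iterate_diagonally := by
  intro grid _
  unfold Spec_iterate_diagonally
  simp only [iterate_diagonally, iterate_diagonally_alt]
  rw [funext fun acc => funext fun s => inner_diag_eq _ _ s acc]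
  rw [funext fun acc => funext fun s => congrArg (acc ++ ·) (bucket_eq _ _ s)]
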